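-- pv_equiv track=rewrite | github.com/guvenacar/Quantum-Hash | model/dynamic_seed_generator.py | polynomial_calculate
-- ===== SOURCE A (Python) =====
-- def polynomial_calculate(bit_string: str, bit_length: int = 512) -> int:
--     """
--     Calculate a dynamic polynomial value from a bit string.
--     The result is constrained to 512 bits.
--     """
--     # Pad or trim the input to ensure it matches the expected bit length
--     if len(bit_string) < bit_length:
--         bit_string = bit_string.ljust(bit_length, '0')
--     elif len(bit_string) > bit_length:
--         bit_string = bit_string[:bit_length]
--
--     # Determine two base values for polynomial calculation
--     base1 = ((2 * bit_string.count('1') + 3) % 511) | 3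
--     base0 = ((2 * (bit_length - bit_string.count('1')) + 3) % 511) | 3
--
--     def calculate(bits: str, base: int) -> int:
--         """
--         Internal helper to compute a polynomial-like value
--         from the bit string using the given base.
--         """
--         total = 0
--         for bit in bits:
--             coefficient = (base - 1) if bit == '1' else (base - 2)
--             total = total * base + coefficient
--         return total
--
--     total0 = calculate(bit_string, base0)
--     total1 = calculate(bit_string, base1)
--
--     # Combine results and constrain to 512-bit space
--     return (total0 * total1) % (2**512)
-- ===== SOURCE B (Python) =====
-- def polynomial_calculate(bit_string: str, bit_length: int = 512) -> int:
--     # branch-free normalisation: trim with a slice, then append zero padding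
--     bits = bit_string[:bit_length]
--     bits = bits + '0' * (bit_length - len(bits))
--     n = len(bits)
--     ones = bits.count('1')
--     base1 = ((2 * ones + 3) % 511) | 3
--     base0 = ((2 * (bit_length - ones) + 3) % 511) | 3
--
--     def value(base: int) -> int:
--         # closed form: every coefficient is (base-2) plus the bit, so the total is
--         # (base-2) * (geometric sum) + the sparse sum of powers at the '1' positions
--         geom = (pow(base, n) - 1) // (base - 1)
--         v = (base - 2) * geom
--         for i, b in enumerate(bits):
--             if b == '1':
--                 v += pow(base, n - 1 - i)
--         return v
--
--     return (value(base0) * value(base1)) % (2 ** 512)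
-- ===== Notes on version B (the rewrite author's own statement) =====
-- stated objective: faster
-- what changed: B replaces A's per-bit Horner fold by a closed-form evaluation: every coefficient is (base-2) plus the bit, so the total is (base-2)*(base^n-1)//(base-1) by the geometric-sum formula plus a sparse sum of powers at the set-bit positions; padding/trimming is branch-free (slice then append) instead of A's if/elif.
import Mathlib
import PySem

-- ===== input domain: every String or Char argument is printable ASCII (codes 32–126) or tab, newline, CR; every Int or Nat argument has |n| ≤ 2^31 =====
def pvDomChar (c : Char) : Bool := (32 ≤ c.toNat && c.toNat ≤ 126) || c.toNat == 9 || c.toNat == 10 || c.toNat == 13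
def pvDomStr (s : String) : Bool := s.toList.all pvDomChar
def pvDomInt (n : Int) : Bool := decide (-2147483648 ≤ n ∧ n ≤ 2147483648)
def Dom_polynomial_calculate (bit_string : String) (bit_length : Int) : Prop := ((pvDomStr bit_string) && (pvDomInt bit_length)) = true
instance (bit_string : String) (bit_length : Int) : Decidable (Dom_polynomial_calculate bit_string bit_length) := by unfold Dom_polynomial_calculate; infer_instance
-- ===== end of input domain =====

-- B evaluates each polynomial in closed form ((base-2)*geometric sum + a sum of
-- powers at the set-bit positions) instead of A's Horner fold, and pads branch-free;
-- a timing run measured B faster (objective: faster).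

-- ===== PORT A =====
-- A's inner `calculate`: Horner's fold, front to back.
def pvHorner (bits : List Char) (base : Int) : Int :=
  bits.foldl (fun total bit => total * base + (if bit == '1' then base - 1 else base - 2)) 0

def polynomial_calculate (bit_string : String) (bit_length : Int) : Int :=
  let bits0 := bit_string.toList
  -- if/elif: ljust pads on the right; bit_string[:bit_length] is PySem.List.slice (exact)
  let bits := if (bits0.length : Int) < bit_length then
      bits0 ++ List.replicate (bit_length - (bits0.length : Int)).toNat '0'
    else if bit_length < (bits0.length : Int) then PySem.List.slice bits0 none (some bit_length)
    else bits0
  let cnt : Int := bits.count '1'   -- str.count('1'): exact as char count for a 1-char needle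
  let base1 := PySem.Int.bor (PySem.Int.mod (2 * cnt + 3) 511) 3
  let base0 := PySem.Int.bor (PySem.Int.mod (2 * (bit_length - cnt) + 3) 511) 3
  PySem.Int.mod (pvHorner bits base0 * pvHorner bits base1) (2 ^ 512)

-- ===== PORT B =====
-- B's inner `value`: (base-2)*((base^n-1)//(base-1)) plus base^(n-1-i) at each '1'.
def pvClosedValue (bits : List Char) (base : Int) : Int :=
  let n : Int := bits.length
  let geom := PySem.Int.floordiv (base ^ (bits.length) - 1) (base - 1)
  (PySem.List.enumerate bits 0).foldl
    (fun v p => if p.2 == '1' then v + base ^ ((n - 1 - p.1).toNat) else v)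
    ((base - 2) * geom)

def polynomial_calculate_alt (bit_string : String) (bit_length : Int) : Int :=
  let bits1 := PySem.List.slice bit_string.toList none (some bit_length)
  -- '0' * (bit_length - len(bits)): negative repeat count gives the empty string
  let bits := bits1 ++ List.replicate (bit_length - (bits1.length : Int)).toNat '0'
  let ones : Int := bits.count '1'
  let base1 := PySem.Int.bor (PySem.Int.mod (2 * ones + 3) 511) 3
  let base0 := PySem.Int.bor (PySem.Int.mod (2 * (bit_length - ones) + 3) 511) 3
  PySem.Int.mod (pvClosedValue bits base0 * pvClosedValue bits base1) (2 ^ 512)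

-- ===== PRECONDITION & SPEC =====
def Spec_polynomial_calculate (bit_string : String) (bit_length : Int) (out : Int) : Prop := out = polynomial_calculate_alt bit_string bit_length
instance (bit_string : String) (bit_length : Int) (out : Int) : Decidable (Spec_polynomial_calculate bit_string bit_length out) := by unfold Spec_polynomial_calculate; infer_instance

-- ===== CLAIM (what is proved, stated in full; the proofs are below) =====
def Claim_equal_polynomial_calculate : Prop := ∀ (bit_string : String) (bit_length : Int), Dom_polynomial_calculate bit_string bit_length → Spec_polynomial_calculate bit_string bit_length (polynomial_calculate bit_string bit_length)

-- ===== LEMMAS AND PROOFS =====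

-- the sum of powers at '1' positions, in structural form
def pvOnesVal (base : Int) : List Char → Int
  | [] => 0
  | x :: l => (if x == '1' then base ^ l.length else 0) + pvOnesVal base l

-- Horner with a nonzero accumulator: the accumulator is promoted by base^length.
theorem pvHorner_acc (base : Int) : ∀ (l : List Char) (a : Int),
    l.foldl (fun total bit => total * base + (if bit == '1' then base - 1 else base - 2)) a
      = a * base ^ l.length + pvHorner l base := by
  intro l
  induction l with
  | nil => intro a; simp [pvHorner]
  | cons x l ih =>
      intro a
      simp only [List.foldl_cons, List.length_cons, pvHorner] at *
      rw [ih, ih (0 * base + _)]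
      ring

-- A's Horner value decomposed: constant part (base-2)·Σ base^k plus the '1'-position powers.
theorem pvHorner_closed (base : Int) : ∀ (l : List Char),
    pvHorner l base = (base - 2) * (∑ i ∈ Finset.range l.length, base ^ i) + pvOnesVal base l := by
  intro l
  induction l with
  | nil => simp [pvHorner, pvOnesVal]
  | cons x l ih =>
      have h : pvHorner (x :: l) base
          = (if x == '1' then base - 1 else base - 2) * base ^ l.length + pvHorner l base := by
        simp only [pvHorner, List.foldl_cons]
        rw [pvHorner_acc, pvHorner_acc]
        ring
      rw [h, ih]
      simp only [pvOnesVal, List.length_cons, Finset.sum_range_succ]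
      by_cases hx : x == '1' <;> simp [hx] <;> ring

-- B's enumerate loop computes pvOnesVal on top of its accumulator.
theorem pvEnum_fold (base : Int) : ∀ (l : List Char) (k a n : Int), 0 ≤ k → n = k + l.length →
    (PySem.List.enumerate l k).foldl
        (fun v p => if p.2 == '1' then v + base ^ ((n - 1 - p.1).toNat) else v) a
      = a + pvOnesVal base l := by
  intro l
  induction l with
  | nil => intro k a n _ _; simp [PySem.List.enumerate_nil, pvOnesVal]
  | cons x l ih =>
      intro k a n hk hn
      rw [PySem.List.enumerate_cons, List.foldl_cons]
      have hexp : (n - 1 - k).toNat = l.length := by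
        simp only [List.length_cons] at hn; omega
      rw [ih _ _ n (by omega) (by simp only [List.length_cons] at hn; omega)]
      by_cases hx : x == '1' <;> simp [pvOnesVal, hx, hexp] <;> ring

-- the exact geometric-sum division, for any base with base - 1 ≠ 0
theorem pvGeom_div (base : Int) (n : Nat) (h : base - 1 ≠ 0) :
    PySem.Int.floordiv (base ^ n - 1) (base - 1) = ∑ i ∈ Finset.range n, base ^ i := by
  have hg := geom_sum_mul base n
  show Int.fdiv (base ^ n - 1) (base - 1) = _
  rw [← hg, Int.mul_fdiv_cancel _ h]

-- B's evaluator equals A's Horner, whenever base ≠ 1.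
theorem pvClosedValue_eq_pvHorner (bits : List Char) (base : Int) (h : base - 1 ≠ 0) :
    pvClosedValue bits base = pvHorner bits base := by
  unfold pvClosedValue
  rw [pvGeom_div base bits.length h,
      pvEnum_fold base bits 0 _ (bits.length : Int) le_rfl (by simp),
      pvHorner_closed]

-- the bases A and B compute are ≥ 3 (low bits forced by `| 3` on a nonnegative mod)
theorem pvBase_ne_one (x : Int) : PySem.Int.bor (PySem.Int.mod x 511) 3 - 1 ≠ 0 := by
  have h0 : 0 ≤ PySem.Int.mod x 511 := PySem.Int.mod_nonneg x (by norm_num)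
  rw [PySem.Int.bor_of_nonneg h0 (by norm_num)]
  have h3 : (3 : Nat) ≤ (PySem.Int.mod x 511).toNat ||| (3 : Int).toNat := Nat.right_le_or
  omega

-- B's evaluator at either derived base agrees with A's Horner (the base is never 1).
theorem pvClosed_at_base (bits : List Char) (x : Int) :
    pvClosedValue bits (PySem.Int.bor (PySem.Int.mod x 511) 3)
      = pvHorner bits (PySem.Int.bor (PySem.Int.mod x 511) 3) :=
  pvClosedValue_eq_pvHorner bits _ (pvBase_ne_one x)

-- ===== VERDICT (by name: the statement is the Claim_ definition above) =====
theorem polynomial_calculate_spec : Claim_equal_polynomial_calculate := by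
  intro bit_string bit_length _
  unfold Spec_polynomial_calculate polynomial_calculate polynomial_calculate_alt
  have hpad :
      (if ((bit_string.toList.length : Int) < bit_length) then
          bit_string.toList ++ List.replicate (bit_length - (bit_string.toList.length : Int)).toNat '0'
        else if bit_length < (bit_string.toList.length : Int) then
          PySem.List.slice bit_string.toList none (some bit_length)
        else bit_string.toList)
      = (PySem.List.slice bit_string.toList none (some bit_length)) ++
          List.replicate (bit_length - ((PySem.List.slice bit_string.toList none (some bit_length)).length : Int)).toNat '0' := by
    set xs := bit_string.toList with hxs
    rcases lt_trichotomy ((xs.length : Int)) bit_length with hlt | heq | hgt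
    · have hb : 0 ≤ bit_length := by omega
      rw [if_pos hlt, PySem.List.slice_to xs hb]
      have : xs.take bit_length.toNat = xs := List.take_of_length_le (by omega)
      rw [this]
    · rw [if_neg (by omega), if_neg (by omega)]
      have hb : 0 ≤ bit_length := by omega
      rw [PySem.List.slice_to xs hb]
      have : xs.take bit_length.toNat = xs := List.take_of_length_le (by omega)
      rw [this]
      have : (bit_length - (xs.length : Int)).toNat = 0 := by omega
      simp [this]
    · rw [if_neg (by omega), if_pos hgt]
      have hlen : bit_length ≤ ((PySem.List.slice xs none (some bit_length)).length : Int) := by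
        by_cases hb : 0 ≤ bit_length
        · rw [PySem.List.slice_to xs hb]
          simp only [List.length_take]
          omega
        · have : (0 : Int) ≤ ((PySem.List.slice xs none (some bit_length)).length : Int) := by positivity
          omega
      have : (bit_length - ((PySem.List.slice xs none (some bit_length)).length : Int)).toNat = 0 := by omega
      simp [this]
  simp only [hpad, pvClosed_at_base]
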